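-- pv_equiv track=rewrite | github.com/penguinic77/gics_linebot | src/utilities.py | is_str_close
-- ===== SOURCE A (Python) =====
-- def is_str_close(a):
--     lista = []
--     flag = True
--     num = 0
--     if a.find("{") == -1 or a.find("}") == -1:
--         return False
--     for i in a:
--         if num == 1:  # 若找到一組括號後還有字元則非法
--             return False
--         if i == "{":
--             lista.append(i)
--         elif i == "}":
--             if len(lista) == 0 or lista.pop() != "{" or num > 1:
--                 return False
--             else:
--                 num += 1
--     if len(lista) != 0:
--         flag = False
--     return flag
-- ===== SOURCE B (Python) =====
-- def is_str_close(a):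
--     return a.endswith("}") and a.count("{") == 1 and a.count("}") == 1
-- ===== Notes on version B (the rewrite author's own statement) =====
-- stated objective: simpler
-- what changed: Replaced A's stack-simulation loop with early returns by a closed-form test: the string ends with '}' and contains exactly one '{' and exactly one '}'.
import Mathlib
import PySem

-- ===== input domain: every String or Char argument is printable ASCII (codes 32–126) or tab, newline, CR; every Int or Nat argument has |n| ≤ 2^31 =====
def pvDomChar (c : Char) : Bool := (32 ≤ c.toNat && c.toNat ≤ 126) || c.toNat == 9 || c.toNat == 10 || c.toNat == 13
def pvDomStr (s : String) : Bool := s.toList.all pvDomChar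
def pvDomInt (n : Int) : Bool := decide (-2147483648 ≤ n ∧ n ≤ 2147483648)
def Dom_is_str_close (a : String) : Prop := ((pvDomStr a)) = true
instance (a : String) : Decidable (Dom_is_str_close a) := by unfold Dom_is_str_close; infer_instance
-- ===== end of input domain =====

-- B replaces A's stack-simulation loop by a closed-form test: the string ends with '}'
-- and contains exactly one '{' and exactly one '}' (objective: simpler).


-- ===== PORT A =====
-- the for-loop of A: state is (lista, num); early 'return False' is a false result
def isStrCloseLoop : List Char → List Char → Int → Bool
  | [], lista, _ =>
      -- after the loop: if len(lista) != 0: flag = False; return flag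
      if lista.length ≠ 0 then false else true
  | i :: rest, lista, num =>
      if num == 1 then false
      else if i == '{' then isStrCloseLoop rest (lista ++ [i]) num
      else if i == '}' then
        -- if len(lista) == 0 or lista.pop() != "{" or num > 1: return False  else: num += 1
        if lista.length == 0 then false
        else
          match PySem.List.pop? lista (-1) with
          | none => false  -- unreachable: lista is nonempty here
          | some (popped, lista') =>
              if popped != '{' || decide (num > 1) then false
              else isStrCloseLoop rest lista' (num + 1)
      else isStrCloseLoop rest lista num

def is_str_close (a : String) : Bool :=
  if PySem.Str.find a "{" == -1 || PySem.Str.find a "}" == -1 then false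
  else isStrCloseLoop a.toList [] 0

-- ===== PORT B =====
def is_str_close_alt (a : String) : Bool :=
  PySem.Str.endswith a "}" && PySem.Str.count a "{" == 1 && PySem.Str.count a "}" == 1

-- ===== PRECONDITION & SPEC =====
def Spec_is_str_close (a : String) (out : Bool) : Prop := out = is_str_close_alt a
instance (a : String) (out : Bool) : Decidable (Spec_is_str_close a out) := by unfold Spec_is_str_close; infer_instance

-- ===== CLAIM (what is proved, stated in full; the proofs are below) =====
def Claim_equal_is_str_close : Prop := ∀ (a : String), Dom_is_str_close a → Spec_is_str_close a (is_str_close a)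

-- ===== LEMMAS AND PROOFS =====

theorem getLast?_cons_ne {α : Type} (x : α) (l : List α) (h : l ≠ []) :
    (x :: l).getLast? = l.getLast? := by
  cases l with
  | nil => simp at h
  | cons b t => simp [List.getLast?_cons_cons]

-- Chars.count with a single-character needle is List.count
theorem countGo_singleton (c : Char) (l : List Char) (acc fuel : Nat) (h : l.length <= fuel) :
    PySem.Chars.count.go [c] fuel l acc = acc + l.count c := by
  induction l generalizing acc fuel with
  | nil => cases fuel <;> simp [PySem.Chars.count.go]
  | cons x t ih =>
      cases fuel with
      | zero => simp at h
      | succ f =>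
        simp only [List.length_cons, Nat.succ_le_succ_iff] at h
        by_cases hx : c = x
        · subst hx
          simp [PySem.Chars.count.go, List.isPrefixOf, ih _ _ h]
          omega
        · simp [PySem.Chars.count.go, List.isPrefixOf, Ne.symm hx, hx, ih _ _ h]

theorem count_singleton (c : Char) (l : List Char) :
    PySem.Chars.count l [c] = l.count c := by
  simp [PySem.Chars.count, countGo_singleton c l 0 l.length le_rfl]

-- loop of A with num = 1: any remaining character returns False, else flag = stack empty
theorem loopA_one (l stack : List Char) :
    isStrCloseLoop l stack 1 = true ↔ l = [] ∧ stack.length = 0 := by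
  cases l <;> simp [isStrCloseLoop]

-- characterisation of A's loop with num = 0 over a stack of k opening braces
theorem loopA_zero (l : List Char) (k : Nat) :
    isStrCloseLoop l (List.replicate k '{') 0 = true ↔
      (l.count '}' = 0 ∧ l.count '{' = 0 ∧ k = 0) ∨
      (l.count '}' = 1 ∧ l.count '{' + k = 1 ∧ l.getLast? = some '}') := by
  induction l generalizing k with
  | nil => simp [isStrCloseLoop]
  | cons c rest ih =>
      by_cases hc1 : c = '{'
      · subst hc1
        have hstep : isStrCloseLoop ('{' :: rest) (List.replicate k '{') 0
            = isStrCloseLoop rest (List.replicate (k + 1) '{') 0 := by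
          simp [isStrCloseLoop, ← List.replicate_succ' (n := k)]
        rw [hstep, ih (k + 1)]
        rcases eq_or_ne rest [] with hr | hr
        · subst hr; simp
        · rw [getLast?_cons_ne _ _ hr]
          simp
          omega
      · by_cases hc2 : c = '}'
        · subst hc2
          cases k with
          | zero =>
              have hstep : isStrCloseLoop ('}' :: rest) (List.replicate 0 '{') 0 = false := by
                simp [isStrCloseLoop]
              rw [hstep]
              rcases eq_or_ne rest [] with hr | hr
              · subst hr; simp
              · rw [getLast?_cons_ne _ _ hr]
                simp only [Bool.false_eq_true, false_iff, List.count_cons]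
                rintro (⟨h1, -⟩ | ⟨h1, -, h3⟩)
                · simp at h1
                · have : '}' ∈ rest := List.mem_of_getLast? h3
                  have := List.count_pos_iff.mpr this
                  simp at h1; omega
          | succ k' =>
              have hpop : PySem.List.pop? (List.replicate (k' + 1) '{') (-1)
                  = some ('{', List.replicate k' '{') := by
                rw [List.replicate_succ' (n := k')]
                exact PySem.List.pop?_last _ _
              have hstep : isStrCloseLoop ('}' :: rest) (List.replicate (k' + 1) '{') 0
                  = isStrCloseLoop rest (List.replicate k' '{') 1 := by
                simp [isStrCloseLoop, hpop]
              rw [hstep, loopA_one]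
              rcases eq_or_ne rest [] with hr | hr
              · subst hr; simp
              · rw [getLast?_cons_ne _ _ hr]
                simp only [List.count_cons, hr, false_and, false_iff, List.length_replicate]
                rintro (⟨h1, -⟩ | ⟨h1, -, h3⟩)
                · simp at h1
                · have : '}' ∈ rest := List.mem_of_getLast? h3
                  have := List.count_pos_iff.mpr this
                  simp at h1; omega
        · have hstep : isStrCloseLoop (c :: rest) (List.replicate k '{') 0
              = isStrCloseLoop rest (List.replicate k '{') 0 := by
            simp [isStrCloseLoop, hc1, hc2]
          rw [hstep, ih k]
          rcases eq_or_ne rest [] with hr | hr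
          · subst hr; simp [hc1, hc2]
          · rw [getLast?_cons_ne _ _ hr]
            simp [hc1, hc2]

theorem endswith_singleton (l : List Char) (c : Char) :
    PySem.Chars.endswith l [c] = true ↔ l.getLast? = some c := by
  rw [PySem.Chars.endswith_iff, List.getLast?_eq_some_iff]
  constructor
  · rintro ⟨t, rfl⟩; exact ⟨t, rfl⟩
  · rintro ⟨t, rfl⟩; exact ⟨t, rfl⟩

theorem find_singleton_eq_neg_one (l : List Char) (c : Char) :
    PySem.Chars.find l [c] = -1 ↔ c ∉ l := by
  rw [PySem.Chars.find_eq_neg_one_iff, List.singleton_infix_iff]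

-- the whole equivalence, stated over the character list
theorem main_list (l : List Char) :
    (if (PySem.Chars.find l ['{'] == -1 || PySem.Chars.find l ['}'] == -1) then false
       else isStrCloseLoop l [] 0)
    = (PySem.Chars.endswith l ['}'] && l.count '{' == 1 && l.count '}' == 1) := by
  rw [Bool.eq_iff_iff]
  by_cases hguard : PySem.Chars.find l ['{'] = -1 ∨ PySem.Chars.find l ['}'] = -1
  · have hg : (PySem.Chars.find l ['{'] == -1 || PySem.Chars.find l ['}'] == -1) = true := by
      rcases hguard with h | h <;> simp [h]
    rw [if_pos hg]
    simp only [Bool.false_eq_true, false_iff, Bool.and_eq_true, beq_iff_eq, not_and]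
    rintro ⟨-, h1⟩ h2
    rcases hguard with h | h <;> rw [find_singleton_eq_neg_one] at h
    · rw [List.count_eq_zero_of_not_mem h] at h1; omega
    · rw [List.count_eq_zero_of_not_mem h] at h2; omega
  · have hg : (PySem.Chars.find l ['{'] == -1 || PySem.Chars.find l ['}'] == -1) = false := by
      rw [not_or] at hguard
      simp [hguard.1, hguard.2]
    rw [if_neg (by simp [hg])]
    rw [not_or] at hguard
    have hmemc : '}' ∈ l := by
      by_contra hm
      exact hguard.2 ((find_singleton_eq_neg_one _ _).mpr hm)
    have hpos := List.count_pos_iff.mpr hmemc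
    have hx : isStrCloseLoop l [] 0 = true ↔
        (l.count '}' = 0 ∧ l.count '{' = 0) ∨
        (l.count '}' = 1 ∧ l.count '{' = 1 ∧ l.getLast? = some '}') := by
      simpa using loopA_zero l 0
    rw [hx, Bool.and_eq_true, Bool.and_eq_true, beq_iff_eq, beq_iff_eq, endswith_singleton]
    constructor
    · rintro (⟨h1, -⟩ | ⟨h1, h2, h3⟩)
      · omega
      · exact ⟨⟨h3, h2⟩, h1⟩
    · rintro ⟨⟨h3, h1⟩, h2⟩
      exact Or.inr ⟨h2, h1, h3⟩

-- ===== VERDICT (by name: the statement is the Claim_ definition above) =====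
theorem is_str_close_spec : Claim_equal_is_str_close := by
  intro a _
  unfold Spec_is_str_close is_str_close is_str_close_alt
  have e1 : ("{" : String).toList = ['{'] := rfl
  have e2 : ("}" : String).toList = ['}'] := rfl
  rw [PySem.Str.find_eq, PySem.Str.find_eq, PySem.Str.endswith_eq, PySem.Str.count_eq,
    PySem.Str.count_eq, e1, e2, count_singleton, count_singleton]
  exact main_list a.toList
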